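-- pv_equiv track=rewrite | github.com/konicaRu/python_study1 | LineAnalysis.py | LineAnalysis
-- ===== SOURCE A (Python) =====
-- def LineAnalysis(line):
--     arr_dot = []
--     arr_star = []
--     elem_dot = ''
--     elem_star = ''
--     for i in range(len(line)):
--         if line[i] == '*':
--             elem_star += '*'
--         if line[i] == '.' and elem_star != '':
--             arr_star.append(elem_star)
--             elem_star = ''
--         if line[i] == '.':
--             elem_dot += '.'
--         if line[i] == '*' and elem_dot != '':
--             arr_dot.append(elem_dot)
--             elem_dot = ''
--         if i == len(line) - 1:
--             arr_star.append(elem_star)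
--     if arr_star[1:] == arr_star[:-1] and arr_dot[1:] == arr_dot[:-1] and line[0] == '*' and line[-1] == '*':
--         return True
--     else:return False
-- ===== SOURCE B (Python) =====
-- def LineAnalysis(line):
--     # Must start and end with '*' (on empty input this raises IndexError, like A).
--     if line[0] != '*' or line[-1] != '*':
--         return False
--     # Characters other than '*' and '.' are transparent: runs merge across them.
--     s = [c for c in line if c in '*.']
--     # p = length of the leading star run, q = length of the following dot run.
--     p = 0
--     while p < len(s) and s[p] == '*':
--         p += 1
--     q = p
--     while q < len(s) and s[q] == '.':
--         q += 1
--     q -= p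
--     # The line is uniform iff s is exactly '*'*p followed by k copies of '.'*q + '*'*p.
--     if (len(s) - p) % (p + q) != 0:
--         return False
--     k = (len(s) - p) // (p + q)
--     return s == list('*' * p + ('.' * q + '*' * p) * k)
-- ===== Notes on version B (the rewrite author's own statement) =====
-- stated objective: faster
-- what changed: B replaces A's single-pass run-collector (four pieces of mutable state gathering every star run and every interior dot run, then pairwise list comparisons) by measuring only the first star run p and first dot run q of the filtered string and comparing the string against the canonical rebuilt pattern '*'*p + ('.'*q + '*'*p)*k; same O(n) asymptotics, but the per-character Python-level loop is replaced by C-level filter/join/compare primitives.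
import Mathlib
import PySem

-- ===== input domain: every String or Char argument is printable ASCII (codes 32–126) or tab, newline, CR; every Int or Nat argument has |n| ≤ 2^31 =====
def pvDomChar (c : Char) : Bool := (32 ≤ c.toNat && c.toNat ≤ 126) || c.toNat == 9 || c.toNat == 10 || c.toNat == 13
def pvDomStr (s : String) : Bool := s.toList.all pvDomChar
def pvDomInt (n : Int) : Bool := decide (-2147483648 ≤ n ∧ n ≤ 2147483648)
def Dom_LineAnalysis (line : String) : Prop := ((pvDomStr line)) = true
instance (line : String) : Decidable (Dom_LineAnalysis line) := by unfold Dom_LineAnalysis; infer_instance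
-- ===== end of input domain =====

-- B checks uniformity by measuring the first star run and first dot run and comparing against the
-- rebuilt canonical pattern, instead of A's one-pass collection of all runs (a timing run
-- measured B faster by a constant factor: bulk primitives instead of a per-character loop).

-- ===== PORT A =====
-- loop state: (arr_star, arr_dot, elem_star, elem_dot)
def pvStA : Type := List (List Char) × List (List Char) × List Char × List Char

-- one iteration's character processing (the four ifs on line[i])
def pvStepC (st : pvStA) (c : Char) : pvStA :=
  match st with
  | (aS, aD, eS, eD) =>
    let eS := if c = '*' then eS ++ ['*'] else eS
    let p1 := if c = '.' ∧ eS ≠ [] then (aS ++ [eS], ([] : List Char)) else (aS, eS)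
    let aS := p1.1
    let eS := p1.2
    let eD := if c = '.' then eD ++ ['.'] else eD
    let p2 := if c = '*' ∧ eD ≠ [] then (aD ++ [eD], ([] : List Char)) else (aD, eD)
    (aS, p2.1, eS, p2.2)

-- 'if i == len(line) - 1: arr_star.append(elem_star)' after the character ifs
def pvStepA (n : Int) (st : pvStA) (ic : Int × Char) : pvStA :=
  match pvStepC st ic.2 with
  | (aS, aD, eS, eD) => if ic.1 = n - 1 then (aS ++ [eS], aD, eS, eD) else (aS, aD, eS, eD)

-- 'for i in range(len(line)): … line[i] …' ported as a fold over enumerate(line);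
-- line[0] / line[-1] via pyGet? (none = IndexError on the empty line, excluded by Pre_).
def LineAnalysis (line : String) : Bool :=
  let cs := line.toList
  match (PySem.List.enumerate cs 0).foldl (pvStepA (cs.length : Int)) ([], [], [], []) with
  | (aS, aD, _, _) =>
    decide (aS.drop 1 = aS.dropLast) && decide (aD.drop 1 = aD.dropLast)
      && (PySem.Str.pyGet? line 0 == some '*') && (PySem.Str.pyGet? line (-1) == some '*')

-- ===== PORT B =====
def LineAnalysis_alt (line : String) : Bool :=
  match PySem.Str.pyGet? line 0, PySem.Str.pyGet? line (-1) with
  | some c0, some cl =>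
    if c0 ≠ '*' ∨ cl ≠ '*' then false
    else
      -- s = [c for c in line if c in '*.']
      let s := line.toList.filter (fun c => c == '*' || c == '.')
      -- the two counting while-loops: p = leading '*' run, q = following '.' run
      let p := (s.takeWhile (fun c => c == '*')).length
      let q := ((s.drop p).takeWhile (fun c => c == '.')).length
      -- all quantities are nonnegative, so Nat %, / agree with Python's
      if (s.length - p) % (p + q) ≠ 0 then false
      else
        let k := (s.length - p) / (p + q)
        s == List.replicate p '*' ++ (List.replicate k (List.replicate q '.' ++ List.replicate p '*')).flatten
  | _, _ => false

-- ===== PRECONDITION & SPEC =====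
-- A evaluates line[0] after the list comparisons, so it raises IndexError exactly on the empty string.
def Pre_LineAnalysis (line : String) : Prop := line ≠ ""
instance (line : String) : Decidable (Pre_LineAnalysis line) := by unfold Pre_LineAnalysis; infer_instance
def pvWitness_LineAnalysis : String := "*.*"

def Spec_LineAnalysis (line : String) (out : Bool) : Prop := out = LineAnalysis_alt line
instance (line : String) (out : Bool) : Decidable (Spec_LineAnalysis line out) := by unfold Spec_LineAnalysis; infer_instance

-- ===== CLAIM (what is proved, stated in full; the proofs are below) =====
def Claim_equal_LineAnalysis : Prop := ∀ (line : String), Dom_LineAnalysis line → Pre_LineAnalysis line → Spec_LineAnalysis line (LineAnalysis line)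

-- ===== LEMMAS AND PROOFS =====

-- the canonical uniform pattern: '*'^p followed by k blocks '.'^q ++ '*'^p
def pvBlocks (p q : Nat) : Nat → List Char
  | 0 => List.replicate p '*'
  | k + 1 => List.replicate p '*' ++ List.replicate q '.' ++ pvBlocks p q k

lemma pvBlocks_eq_build (p q k : Nat) :
    List.replicate p '*' ++ (List.replicate k (List.replicate q '.' ++ List.replicate p '*')).flatten
      = pvBlocks p q k := by
  induction k with
  | zero => simp [pvBlocks]
  | succ k ih =>
    simp only [List.replicate_succ, List.flatten_cons, pvBlocks, ← ih]
    simp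

lemma pvBlocks_length (p q k : Nat) : (pvBlocks p q k).length = p + k * (q + p) := by
  induction k with
  | zero => simp [pvBlocks]
  | succ k ih => simp [pvBlocks, ih]; ring

-- evaluation lemmas for one step
lemma pvStepC_star_nil (aS aD : List (List Char)) (eS : List Char) :
    pvStepC (aS, aD, eS, []) '*' = (aS, aD, eS ++ ['*'], []) := by
  simp [pvStepC]

lemma pvStepC_star_flush (aS aD : List (List Char)) (eS eD : List Char) (h : eD ≠ []) :
    pvStepC (aS, aD, eS, eD) '*' = (aS, aD ++ [eD], eS ++ ['*'], []) := by
  simp [pvStepC, h]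

lemma pvStepC_dot_nil (aS aD : List (List Char)) (eD : List Char) :
    pvStepC (aS, aD, [], eD) '.' = (aS, aD, [], eD ++ ['.']) := by
  simp [pvStepC]

lemma pvStepC_dot_flush (aS aD : List (List Char)) (eS eD : List Char) (h : eS ≠ []) :
    pvStepC (aS, aD, eS, eD) '.' = (aS ++ [eS], aD, [], eD ++ ['.']) := by
  simp [pvStepC, h]

lemma pvStepC_other (st : pvStA) (c : Char) (h1 : c ≠ '*') (h2 : c ≠ '.') :
    pvStepC st c = st := by
  obtain ⟨aS, aD, eS, eD⟩ := st
  simp [pvStepC, h1, h2]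

-- the enumerate fold is the plain character fold plus the final append of elem_star
lemma pvFold_enum (cs : List Char) (hne : cs ≠ []) :
    ∀ (st : pvStA) (s n : Int), s + cs.length = n →
    (PySem.List.enumerate cs s).foldl (pvStepA n) st =
      (match cs.foldl pvStepC st with
       | (aS, aD, eS, eD) => (aS ++ [eS], aD, eS, eD)) := by
  induction cs with
  | nil => exact absurd rfl hne
  | cons c t ih =>
    intro st s n hn
    cases t with
    | nil =>
      have hs : s = n - 1 := by simp at hn; omega
      simp only [PySem.List.enumerate_cons, PySem.List.enumerate_nil, List.foldl_cons,
        List.foldl_nil, pvStepA, hs]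
      rcases pvStepC st c with ⟨aS, aD, eS, eD⟩
      simp
    | cons d t2 =>
      have hs : ¬ ((s : Int) = n - 1) := by
        simp only [List.length_cons] at hn; push_cast at hn; omega
      simp only [PySem.List.enumerate_cons, List.foldl_cons]
      have hstep : pvStepA n st (s, c) = pvStepC st c := by
        rcases h : pvStepC st c with ⟨aS, aD, eS, eD⟩
        simp [pvStepA, h, hs]
      rw [hstep]
      exact ih (by simp) (pvStepC st c) (s + 1) n (by simp only [List.length_cons] at hn ⊢; push_cast at hn ⊢; omega)

-- characters that are neither '*' nor '.' are transparent to the loop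
lemma pvFold_filter (cs : List Char) : ∀ (st : pvStA),
    cs.foldl pvStepC st = (cs.filter (fun c => c == '*' || c == '.')).foldl pvStepC st := by
  induction cs with
  | nil => intro st; rfl
  | cons c t ih =>
    intro st
    by_cases h1 : c = '*'
    · simp [List.filter, h1, List.foldl, ih]
    · by_cases h2 : c = '.'
      · simp [List.filter, h2, List.foldl, ih]
      · have hf : (c == '*' || c == '.') = false := by simp [h1, h2]
        simp [List.filter, hf, List.foldl, ih, pvStepC_other st c h1 h2]

-- completed runs only accumulate: the fold from a state with prefixes equals the fold from the
-- prefix-free state with the prefixes glued on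
lemma pvFold_prefix (t : List Char) : ∀ (aS₀ aD₀ : List (List Char)) (eS eD : List Char),
    t.foldl pvStepC (aS₀, aD₀, eS, eD) =
      (match t.foldl pvStepC ([], [], eS, eD) with
       | (a, b, c, d) => (aS₀ ++ a, aD₀ ++ b, c, d)) := by
  induction t with
  | nil => intro aS₀ aD₀ eS eD; simp
  | cons c t ih =>
    intro aS₀ aD₀ eS eD
    have hstep : ∀ (A : List (List Char)) (B : List (List Char)),
        pvStepC (A, B, eS, eD) c =
          (match pvStepC ([], [], eS, eD) c with
           | (a, b, x, y) => (A ++ a, B ++ b, x, y)) := by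
      intro A B
      by_cases h1 : c = '*'
      · subst h1
        by_cases hD : eD = []
        · subst hD; simp [pvStepC_star_nil]
        · simp [pvStepC_star_flush _ _ _ _ hD]
      · by_cases h2 : c = '.'
        · subst h2
          by_cases hS : eS = []
          · subst hS; simp [pvStepC_dot_nil]
          · simp [pvStepC_dot_flush _ _ _ _ hS]
        · simp [pvStepC_other _ c h1 h2]
    simp only [List.foldl_cons]
    rw [hstep aS₀ aD₀]
    rcases h : pvStepC ([], [], eS, eD) c with ⟨a, b, x, y⟩
    rw [ih (aS₀ ++ a) (aD₀ ++ b) x y, ih a b x y]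
    rcases t.foldl pvStepC ([], [], x, y) with ⟨a', b', x', y'⟩
    simp

lemma pvFold_stars (p : Nat) : ∀ (aS aD : List (List Char)) (eS : List Char),
    (List.replicate p '*').foldl pvStepC (aS, aD, eS, []) = (aS, aD, eS ++ List.replicate p '*', []) := by
  induction p with
  | zero => intro aS aD eS; simp
  | succ p ih =>
    intro aS aD eS
    simp only [List.replicate_succ, List.foldl_cons, pvStepC_star_nil, ih]
    simp [List.append_assoc]

lemma pvFold_dots0 (q : Nat) : ∀ (aS aD : List (List Char)) (eD : List Char),
    (List.replicate q '.').foldl pvStepC (aS, aD, [], eD) = (aS, aD, [], eD ++ List.replicate q '.') := by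
  induction q with
  | zero => intro aS aD eD; simp
  | succ q ih =>
    intro aS aD eD
    simp only [List.replicate_succ, List.foldl_cons, pvStepC_dot_nil, ih]
    simp [List.append_assoc]

-- fold over a full blocks suffix from a pending-dot state
lemma pvFold_blocks_tail (p q : Nat) (hp : 1 ≤ p) (hq : 1 ≤ q) :
    ∀ (k : Nat) (aS aD : List (List Char)) (eD : List Char), eD ≠ [] →
    (pvBlocks p q k).foldl pvStepC (aS, aD, [], eD) =
      (aS ++ List.replicate k (List.replicate p '*'),
       aD ++ [eD] ++ List.replicate k (List.replicate q '.'),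
       List.replicate p '*', []) := by
  intro k
  induction k with
  | zero =>
    intro aS aD eD heD
    obtain ⟨p', rfl⟩ : ∃ p', p = p' + 1 := ⟨p - 1, by omega⟩
    simp only [pvBlocks, List.replicate_succ, List.foldl_cons, pvStepC_star_flush _ _ _ _ heD,
      pvFold_stars]
    simp [List.replicate_succ]
  | succ k ih =>
    intro aS aD eD heD
    obtain ⟨p', rfl⟩ : ∃ p', p = p' + 1 := ⟨p - 1, by omega⟩
    obtain ⟨q', rfl⟩ : ∃ q', q = q' + 1 := ⟨q - 1, by omega⟩
    simp only [pvBlocks, List.foldl_append, List.replicate_succ, List.foldl_cons,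
      pvStepC_star_flush _ _ _ _ heD, pvFold_stars, List.nil_append]
    rw [pvStepC_dot_flush _ _ _ _ (by simp), pvFold_dots0, ih _ _ _ (by simp)]
    simp [List.replicate_succ, List.append_assoc]

lemma pvFold_blocks_fresh (p q : Nat) (hp : 1 ≤ p) (k : Nat) (hq : k ≠ 0 → 1 ≤ q) :
    (pvBlocks p q k).foldl pvStepC ([], [], [], []) =
      (List.replicate k (List.replicate p '*'),
       List.replicate k (List.replicate q '.'),
       List.replicate p '*', []) := by
  cases k with
  | zero => simpa using pvFold_stars p [] [] []
  | succ k =>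
    have hq1 : 1 ≤ q := hq (by omega)
    obtain ⟨p', rfl⟩ : ∃ p', p = p' + 1 := ⟨p - 1, by omega⟩
    obtain ⟨q', rfl⟩ : ∃ q', q = q' + 1 := ⟨q - 1, by omega⟩
    simp only [pvBlocks, List.foldl_append, List.replicate_succ, List.foldl_cons,
      pvStepC_star_nil, pvFold_stars, List.nil_append]
    rw [pvStepC_dot_flush _ _ _ _ (by simp), pvFold_dots0,
      pvFold_blocks_tail (p' + 1) (q' + 1) (by omega) (by omega) k _ _ _ (by simp)]
    simp [List.replicate_succ]

-- arr[1:] == arr[:-1] says: all entries equal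
lemma pvConst_iff (l : List (List Char)) :
    l.drop 1 = l.dropLast ↔ ∃ c, l = List.replicate l.length c := by
  induction l with
  | nil => exact ⟨fun _ => ⟨[], rfl⟩, fun _ => rfl⟩
  | cons x t ih =>
    cases t with
    | nil => exact ⟨fun _ => ⟨x, rfl⟩, fun _ => rfl⟩
    | cons y t2 =>
      constructor
      · intro h
        rw [List.drop_one, List.tail_cons, List.dropLast_cons₂] at h
        obtain ⟨h1, h2⟩ := List.cons.inj h
        obtain ⟨c, hc⟩ := ih.mp (by rw [List.drop_one, List.tail_cons]; exact h2)
        refine ⟨c, ?_⟩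
        simp only [List.length_cons, List.replicate_succ] at hc ⊢
        obtain ⟨hyc, ht⟩ := List.cons.inj hc
        rw [← hc, show x = c from h1.symm.trans hyc]
      · rintro ⟨c, hc⟩
        simp only [List.length_cons, List.replicate_succ] at hc
        obtain ⟨h1, hc2⟩ := List.cons.inj hc
        obtain ⟨h2, ht⟩ := List.cons.inj hc2
        rw [List.drop_one, List.tail_cons, List.dropLast_cons₂]
        have hdl : (y :: t2).dropLast = t2 := by
          rw [h2, ht, ← List.replicate_succ, List.replicate_succ', List.dropLast_concat]
        rw [hdl, h1, h2]

-- q = 0 collapses the pattern to pure stars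
lemma pvBlocks_q0 (p k : Nat) : pvBlocks p 0 k = List.replicate (p + k * p) '*' := by
  induction k with
  | zero => simp [pvBlocks]
  | succ k ih =>
    simp only [pvBlocks, ih, List.replicate_zero, List.append_nil, ← List.replicate_add]
    congr 1
    ring

-- proof-side abbreviations: first star run, following dot run, A's constancy condition
def pvP (s : List Char) : Nat := (s.takeWhile (fun c => c == '*')).length

def pvQ (s : List Char) : Nat := ((s.drop (pvP s)).takeWhile (fun c => c == '.')).length

def pvACond (s : List Char) : Prop :=
  match s.foldl pvStepC ([], [], [], []) with
  | (aS, aD, eS, _) => (aS ++ [eS]).drop 1 = (aS ++ [eS]).dropLast ∧ aD.drop 1 = aD.dropLast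

lemma pvTW_star (s : List Char) : s.takeWhile (fun c => c == '*') = List.replicate (pvP s) '*' := by
  refine List.eq_replicate_iff.mpr ⟨rfl, fun b hb => ?_⟩
  simpa using List.mem_takeWhile_imp hb

lemma pvTW_dot (s : List Char) : s.takeWhile (fun c => c == '.') = List.replicate ((s.takeWhile (fun c => c == '.')).length) '.' := by
  refine List.eq_replicate_iff.mpr ⟨rfl, fun b hb => ?_⟩
  simpa using List.mem_takeWhile_imp hb

lemma pvDrop_p (s : List Char) : s.drop (pvP s) = s.dropWhile (fun c => c == '*') := by
  induction s with
  | nil => rfl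
  | cons c t ih =>
    by_cases h : (c == '*') = true
    · simp [pvP, List.takeWhile_cons, List.dropWhile_cons, h] at ih ⊢
      exact ih
    · simp only [Bool.not_eq_true] at h
      simp [pvP, List.takeWhile_cons, List.dropWhile_cons, h]

lemma pvQ_eq (s : List Char) :
    pvQ s = ((s.dropWhile (fun c => c == '*')).takeWhile (fun c => c == '.')).length := by
  rw [pvQ, pvDrop_p]

lemma pvP_pos (s : List Char) (h : s.head? = some '*') : 1 ≤ pvP s := by
  cases s with
  | nil => simp at h
  | cons c t =>
    simp only [List.head?_cons, Option.some.injEq] at h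
    subst h
    simp [pvP, List.takeWhile_cons]

-- THE characterization: for a '*'/'.'-string starting and ending with '*', A's constancy test
-- holds iff the string is the canonical pattern built from its first star run and first dot run.
lemma pvMainAux : ∀ (n : Nat) (s : List Char), s.length ≤ n →
    (∀ c ∈ s, c = '*' ∨ c = '.') → s.head? = some '*' → s.getLast? = some '*' →
    (pvACond s ↔ ∃ k, s = pvBlocks (pvP s) (pvQ s) k) := by
  intro n
  induction n with
  | zero =>
    intro s hlen hchars hhead _
    cases s with
    | nil => simp at hhead
    | cons c t => simp at hlen
  | succ n ih =>
    intro s hlen hchars hhead hlast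
    have hp : 1 ≤ pvP s := pvP_pos s hhead
    by_cases hre : s.dropWhile (fun c => c == '*') = []
    · -- s is a pure star run: both sides hold
      have hs : s = List.replicate (pvP s) '*' := by
        conv_lhs => rw [← List.takeWhile_append_dropWhile (p := fun c => c == '*') (l := s)]
        rw [hre, List.append_nil, pvTW_star]
      constructor
      · intro _
        exact ⟨0, by rw [pvBlocks]; exact hs⟩
      · intro _
        rw [pvACond]
        conv_lhs => rw [hs]
        rw [pvFold_stars]
        simp
    · -- the remainder starts with a dot
      have hrd : ∃ t2, s.dropWhile (fun c => c == '*') = '.' :: t2 := by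
        obtain ⟨c, t2, hct⟩ := List.exists_cons_of_ne_nil hre
        have hh := List.head_dropWhile_not (fun c => c == '*') hre
        simp only [hct, List.head_cons] at hh
        have hcm : c ∈ s := (List.dropWhile_sublist _).mem (by rw [hct]; exact List.mem_cons_self)
        rcases hchars c hcm with h | h
        · rw [h] at hh; simp at hh
        · exact ⟨t2, by rw [hct, h]⟩
      have hq : 1 ≤ pvQ s := by
        obtain ⟨t2, ht2⟩ := hrd
        rw [pvQ_eq, ht2]
        simp [List.takeWhile_cons]
      have hrsplit : s.dropWhile (fun c => c == '*') =
          List.replicate (pvQ s) '.' ++ (s.dropWhile (fun c => c == '*')).dropWhile (fun c => c == '.') := by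
        conv_lhs => rw [← List.takeWhile_append_dropWhile (p := fun c => c == '.')
          (l := s.dropWhile (fun c => c == '*'))]
        rw [pvTW_dot, ← pvQ_eq]
      have hsplit2 : s = List.replicate (pvP s) '*' ++ List.replicate (pvQ s) '.' ++
          (s.dropWhile (fun c => c == '*')).dropWhile (fun c => c == '.') := by
        rw [List.append_assoc, ← hrsplit]
        conv_lhs => rw [← List.takeWhile_append_dropWhile (p := fun c => c == '*') (l := s)]
        rw [pvTW_star]
      have hs2ne : (s.dropWhile (fun c => c == '*')).dropWhile (fun c => c == '.') ≠ [] := by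
        intro hnil
        rw [hsplit2, hnil, List.append_nil,
          List.getLast?_append_of_ne_nil _ (by
            intro h
            have := congrArg List.length h
            simp at this
            omega)] at hlast
        obtain ⟨q', hq'⟩ : ∃ q', pvQ s = q' + 1 := ⟨pvQ s - 1, by omega⟩
        rw [hq', List.replicate_succ', List.getLast?_concat] at hlast
        simp at hlast
      obtain ⟨c2, t₂, hct2⟩ := List.exists_cons_of_ne_nil hs2ne
      have hh2 := List.head_dropWhile_not (fun c => c == '.') hs2ne
      simp only [hct2, List.head_cons] at hh2
      have hc2 : c2 = '*' := by
        have hcm : c2 ∈ s := (List.dropWhile_sublist _).mem ((List.dropWhile_sublist _).mem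
          (by rw [hct2]; exact List.mem_cons_self))
        rcases hchars c2 hcm with h | h
        · exact h
        · rw [h] at hh2; simp at hh2
      rw [hc2] at hct2
      generalize hS2 : (s.dropWhile (fun c => c == '*')).dropWhile (fun c => c == '.') = s₂
        at hsplit2 hrsplit hct2
      have ht₂ : s₂ = '*' :: t₂ := hct2
      have hs2ne' : s₂ ≠ [] := by rw [ht₂]; simp
      have hs2head : s₂.head? = some '*' := by rw [ht₂]; rfl
      have hs2chars : ∀ c ∈ s₂, c = '*' ∨ c = '.' := fun c hc =>
        hchars c (by rw [hsplit2]; simp only [List.mem_append]; right; exact hc)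
      have hs2last : s₂.getLast? = some '*' := by
        rw [hsplit2, List.getLast?_append_of_ne_nil _ hs2ne'] at hlast
        exact hlast
      have hs2len : s₂.length ≤ n := by
        have := congrArg List.length hsplit2
        simp at this
        omega
      have hIH := ih s₂ hs2len hs2chars hs2head hs2last
      -- fold decomposition: the fold over s is the fold over s₂ with the first period's runs glued on
      have hfold : s.foldl pvStepC ([], [], [], []) =
          (match s₂.foldl pvStepC ([], [], [], []) with
           | (a2, b2, e2, d2) =>
             (List.replicate (pvP s) '*' :: a2, List.replicate (pvQ s) '.' :: b2, e2, d2)) := by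
        conv_lhs => rw [hsplit2]
        rw [List.foldl_append, List.foldl_append, pvFold_stars]
        obtain ⟨q', hq'⟩ : ∃ q', pvQ s = q' + 1 := ⟨pvQ s - 1, by omega⟩
        rw [hq', List.replicate_succ, List.foldl_cons,
          pvStepC_dot_flush _ _ _ _ (by
            intro h
            have := congrArg List.length h
            simp at this
            omega), pvFold_dots0]
        conv_lhs => rw [ht₂]
        conv_rhs => rw [ht₂]
        rw [List.foldl_cons, List.foldl_cons,
          pvStepC_star_flush _ _ _ _ (by simp), pvStepC_star_nil]
        simp only [List.nil_append, List.singleton_append]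
        rw [pvFold_prefix t₂ [List.replicate (pvP s) '*'] [('.' :: List.replicate q' '.')] (['*']) []]
        rcases List.foldl pvStepC ([], [], ['*'], []) t₂ with ⟨a2, b2, e2, d2⟩
        simp [List.replicate_succ]
      constructor
      · -- A's condition on s forces the canonical pattern
        intro hA
        rw [pvACond, hfold] at hA
        rcases h2 : s₂.foldl pvStepC ([], [], [], []) with ⟨a2, b2, e2, d2⟩
        rw [h2] at hA
        obtain ⟨hAs, hAd⟩ := hA
        rw [List.cons_append, pvConst_iff] at hAs
        rw [pvConst_iff] at hAd
        obtain ⟨cS, hcS⟩ := hAs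
        obtain ⟨cD, hcD⟩ := hAd
        simp only [List.length_cons, List.replicate_succ] at hcS hcD
        obtain ⟨hcS1, hcS2⟩ := List.cons.inj hcS
        obtain ⟨hcD1, hcD2⟩ := List.cons.inj hcD
        have hA2 : pvACond s₂ := by
          rw [pvACond, h2]
          exact ⟨(pvConst_iff _).mpr ⟨cS, by rw [hcS2]; simp⟩,
                 (pvConst_iff _).mpr ⟨cD, by rw [hcD2]; simp⟩⟩
        obtain ⟨k₂, hk₂⟩ := hIH.mp hA2
        have hp2 : 1 ≤ pvP s₂ := pvP_pos s₂ hs2head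
        have hq2 : k₂ ≠ 0 → 1 ≤ pvQ s₂ := by
          intro hk0
          by_contra hq0
          have hq0' : pvQ s₂ = 0 := by omega
          obtain ⟨k', hk'⟩ : ∃ k', k₂ = k' + 1 := ⟨k₂ - 1, by omega⟩
          rw [hk', hq0', pvBlocks_q0] at hk₂
          have : pvP s₂ = pvP s₂ + (k' + 1) * pvP s₂ := by
            conv_lhs => rw [pvP, hk₂]
            rw [List.takeWhile_eq_self_iff.mpr (by intro a ha; simp at ha; simp [ha])]
            simp
          have hmul : (k' + 1) * pvP s₂ ≠ 0 := Nat.mul_ne_zero (by omega) (by omega)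
          omega
        have hfold2 := pvFold_blocks_fresh (pvP s₂) (pvQ s₂) hp2 k₂ hq2
        rw [← hk₂, h2] at hfold2
        have ha2 := congrArg (fun x : pvStA => x.1) hfold2
        have hb2 := congrArg (fun x : pvStA => x.2.1) hfold2
        have he2 := congrArg (fun x : pvStA => x.2.2.1) hfold2
        dsimp only at ha2 hb2 he2
        -- e2 is an entry of the constant star-run list: pvP s₂ = pvP s
        have hmemE : e2 = cS := by
          have : e2 ∈ a2 ++ [e2] := by simp
          rw [hcS2] at this
          exact List.eq_of_mem_replicate this
        have hpp : pvP s₂ = pvP s := by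
          have h3 : List.replicate (pvP s₂) '*' = List.replicate (pvP s) '*' := by
            rw [← he2, hmemE, ← hcS1]
          have := congrArg List.length h3
          simpa using this
        cases k₂ with
        | zero =>
          refine ⟨1, ?_⟩
          conv_lhs => rw [hsplit2]
          rw [hk₂, hpp]
          simp only [pvBlocks, List.append_assoc]
        | succ k' =>
          -- the dot-run lists identify pvQ s₂ with pvQ s
          have hmemD : List.replicate (pvQ s₂) '.' ∈ b2 := by
            rw [hb2, List.replicate_succ]
            simp
          have hqq : pvQ s₂ = pvQ s := by
            have h1 : List.replicate (pvQ s₂) '.' = cD := by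
              have h4 := hmemD
              rw [hcD2] at h4
              exact List.eq_of_mem_replicate h4
            have h3 : List.replicate (pvQ s₂) '.' = List.replicate (pvQ s) '.' := by
              rw [h1, ← hcD1]
            have := congrArg List.length h3
            simpa using this
          refine ⟨k' + 1 + 1, ?_⟩
          conv_lhs => rw [hsplit2]
          rw [hk₂, hpp, hqq]
          simp only [pvBlocks, List.append_assoc]
      · -- the canonical pattern satisfies A's condition
        intro hEx
        obtain ⟨k, hk⟩ := hEx
        rw [pvACond]
        conv_lhs => rw [hk]
        rw [pvFold_blocks_fresh (pvP s) (pvQ s) hp k (fun _ => hq)]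
        constructor
        · rw [pvConst_iff]
          exact ⟨List.replicate (pvP s) '*', by simp [List.replicate_succ']⟩
        · rw [pvConst_iff]
          exact ⟨List.replicate (pvQ s) '.', by simp⟩

-- the filter keeps a leading '*' in front and a trailing '*' at the back
lemma pvFilter_head (l : List Char) (h : l.head? = some '*') :
    (l.filter (fun c => c == '*' || c == '.')).head? = some '*' := by
  cases l with
  | nil => simp at h
  | cons c t =>
    simp only [List.head?_cons, Option.some.injEq] at h
    subst h
    simp [List.filter]

lemma pvFilter_last (l : List Char) (h : l.getLast? = some '*') :
    (l.filter (fun c => c == '*' || c == '.')).getLast? = some '*' := by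
  rw [List.getLast?_eq_head?_reverse] at h ⊢
  rw [← List.filter_reverse]
  exact pvFilter_head _ h

-- B's arithmetic screen plus rebuild-and-compare accepts exactly the canonical patterns
lemma pvB_iff (s : List Char) (p q : Nat) (hp : 1 ≤ p) :
    ((if (s.length - p) % (p + q) ≠ 0 then false
      else (s == List.replicate p '*' ++
        (List.replicate ((s.length - p) / (p + q)) (List.replicate q '.' ++ List.replicate p '*')).flatten)) = true)
    ↔ ∃ k, s = pvBlocks p q k := by
  split_ifs with h
  · constructor
    · intro habs
      simp at habs
    · rintro ⟨k, hk⟩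
      exfalso
      apply h
      rw [hk, pvBlocks_length]
      have h1 : p + k * (q + p) - p = k * (q + p) := by omega
      have h2 : q + p = p + q := by omega
      rw [h1, h2]
      exact Nat.mul_mod_left k (p + q)
  · rw [beq_iff_eq, pvBlocks_eq_build]
    constructor
    · intro hk
      exact ⟨_, hk⟩
    · rintro ⟨k, hk⟩
      have hlen : s.length = p + k * (q + p) := by rw [hk, pvBlocks_length]
      have hdiv : (s.length - p) / (p + q) = k := by
        rw [hlen]
        have h1 : p + k * (q + p) - p = k * (p + q) := by ring_nf; omega
        rw [h1, Nat.mul_div_cancel _ (by omega)]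
      rw [hdiv]
      exact hk

-- ===== VERDICT (by name: the statement is the Claim_ definition above) =====
theorem LineAnalysis_spec : Claim_equal_LineAnalysis := by
  intro line _ hpre
  unfold Spec_LineAnalysis
  have hcs : line.toList ≠ [] := by simpa using hpre
  have hg0 : PySem.Str.pyGet? line 0 = line.toList.head? := by
    simp [PySem.Str.pyGet?, PySem.List.pyGet?_zero, List.head?_eq_getElem?]
  have hg1 : PySem.Str.pyGet? line (-1) = line.toList.getLast? := by
    simp [PySem.Str.pyGet?, PySem.List.pyGet?_neg_one]
  obtain ⟨c0, t0, hc0⟩ := List.exists_cons_of_ne_nil hcs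
  have hhead : line.toList.head? = some c0 := by rw [hc0]; rfl
  obtain ⟨cl, hcl⟩ : ∃ cl, line.toList.getLast? = some cl := by
    cases h : line.toList.getLast? with
    | none => exact absurd (List.getLast?_eq_none_iff.mp h) hcs
    | some x => exact ⟨x, rfl⟩
  simp only [LineAnalysis, LineAnalysis_alt]
  rw [hg0, hg1, hhead, hcl]
  by_cases hc0s : c0 = '*'
  · by_cases hcls : cl = '*'
    · subst hc0s
      subst hcls
      have hheadS := pvFilter_head line.toList hhead
      have hlastS := pvFilter_last line.toList hcl
      have hcharsS : ∀ c ∈ line.toList.filter (fun c => c == '*' || c == '.'), c = '*' ∨ c = '.' := by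
        intro c hc
        rw [List.mem_filter] at hc
        simpa using hc.2
      have hp := pvP_pos _ hheadS
      have hMain := pvMainAux (line.toList.filter (fun c => c == '*' || c == '.')).length _
        le_rfl hcharsS hheadS hlastS
      have hBiff := pvB_iff (line.toList.filter (fun c => c == '*' || c == '.'))
        ((line.toList.filter (fun c => c == '*' || c == '.')).takeWhile (fun c => c == '*')).length
        (((line.toList.filter (fun c => c == '*' || c == '.')).drop
            ((line.toList.filter (fun c => c == '*' || c == '.')).takeWhile (fun c => c == '*')).length).takeWhile
          (fun c => c == '.')).length hp
      rw [pvFold_enum line.toList hcs ([], [], [], []) 0 ((line.toList.length : Int)) (by simp)]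
      rw [pvFold_filter]
      rcases hf : (line.toList.filter (fun c => c == '*' || c == '.')).foldl pvStepC ([], [], [], [])
        with ⟨aS, aD, eS, eD⟩
      rw [pvACond, hf] at hMain
      rw [Bool.eq_iff_iff]
      simp only [Bool.and_eq_true, decide_eq_true_eq, beq_self_eq_true, and_true, ne_eq,
        not_true_eq_false, or_self, if_false]
      exact hMain.trans hBiff.symm
    · rcases hf : (PySem.List.enumerate line.toList 0).foldl (pvStepA (line.toList.length : Int))
        ([], [], [], []) with ⟨aS, aD, eS, eD⟩
      simp [hcls]
  · rcases hf : (PySem.List.enumerate line.toList 0).foldl (pvStepA (line.toList.length : Int))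
      ([], [], [], []) with ⟨aS, aD, eS, eD⟩
    simp [hc0s]
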